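-- pv_equiv track=rewrite | github.com/pourmousavi/LitOrbit | backend/app/services/podcast.py | _parse_dual_script
-- ===== SOURCE A (Python) =====
-- def _parse_dual_script(script: str) -> list[tuple[str, str]]:
--     """Parse a dual-voice script into (speaker, text) pairs."""
--     segments: list[tuple[str, str]] = []
--     current_speaker = ""
--     current_text = ""
--
--     for line in script.split("\n"):
--         line = line.strip()
--         if not line:
--             continue
--
--         if line.upper().startswith("ALEX:"):
--             if current_speaker and current_text:
--                 segments.append((current_speaker, current_text.strip()))
--             current_speaker = "alex"
--             current_text = line[5:].strip()
--         elif line.upper().startswith("SAM:"):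
--             if current_speaker and current_text:
--                 segments.append((current_speaker, current_text.strip()))
--             current_speaker = "sam"
--             current_text = line[4:].strip()
--         else:
--             current_text += " " + line
--
--     if current_speaker and current_text:
--         segments.append((current_speaker, current_text.strip()))
--
--     return segments
-- ===== SOURCE B (Python) =====
-- def _parse_dual_script(script: str) -> list[tuple[str, str]]:
--     """Parse a dual-voice script into (speaker, text) pairs."""
--     records: list[tuple[str, list[str]]] = []
--     for raw in script.split("\n"):
--         line = raw.strip()
--         if not line:
--             continue
--         upper = line.upper()
--         if upper.startswith("ALEX:"):
--             records.append(("alex", [line[5:].strip()]))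
--         elif upper.startswith("SAM:"):
--             records.append(("sam", [line[4:].strip()]))
--         elif records:
--             records[-1][1].append(line)
--     out: list[tuple[str, str]] = []
--     for speaker, frags in records:
--         text = " ".join(frags).strip()
--         if speaker and text:
--             out.append((speaker, text))
--     return out
-- ===== Notes on version B (the rewrite author's own statement) =====
-- stated objective: alternative
-- what changed: Replaces A's flush-on-transition accumulator (current speaker/text flushed into the result when the next marker or end-of-input arrives) with an eager build-then-filter pass: each marker line appends a (speaker, fragments) record, continuation lines append to the last record, and a final pass joins each record's fragments with a single space, strips, and filters out empty-text records.
import Mathlib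
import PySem

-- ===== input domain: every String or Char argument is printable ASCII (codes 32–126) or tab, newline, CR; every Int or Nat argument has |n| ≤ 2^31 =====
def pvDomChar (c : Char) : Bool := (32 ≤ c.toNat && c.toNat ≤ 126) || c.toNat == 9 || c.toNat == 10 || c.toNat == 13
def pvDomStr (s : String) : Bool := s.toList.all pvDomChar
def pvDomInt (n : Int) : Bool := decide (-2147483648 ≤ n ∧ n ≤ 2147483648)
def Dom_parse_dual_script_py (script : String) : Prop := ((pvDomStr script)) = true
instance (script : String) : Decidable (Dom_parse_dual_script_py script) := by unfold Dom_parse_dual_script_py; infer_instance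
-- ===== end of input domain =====

-- B replaces A's flush-on-transition accumulator with an eager build-then-filter pass
-- (records of (speaker, fragment list) appended as lines arrive, joined and filtered at the end);
-- same algorithm class and cost, a different decomposition.


-- ===== PORT A =====
-- A's flush `if current_speaker and current_text: segments.append(...)` (the code Python repeats
-- in three places) as a helper.
def pvFlushA (segs : List (List Char × List Char)) (spk txt : List Char) :
    List (List Char × List Char) :=
  if spk ≠ [] ∧ txt ≠ [] then segs ++ [(spk, PySem.Chars.strip txt)] else segs

-- one iteration of A's `for line in script.split("\n")` loop; state = (segments, speaker, text)
def pvStepA (st : List (List Char × List Char) × List Char × List Char) (raw : List Char) :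
    List (List Char × List Char) × List Char × List Char :=
  let line := PySem.Chars.strip raw
  if line = [] then st
  else if PySem.Chars.startswith (PySem.Chars.upper line) "ALEX:".toList then
    (pvFlushA st.1 st.2.1 st.2.2, "alex".toList,
      PySem.Chars.strip (PySem.Chars.slice line (some 5) none))
  else if PySem.Chars.startswith (PySem.Chars.upper line) "SAM:".toList then
    (pvFlushA st.1 st.2.1 st.2.2, "sam".toList,
      PySem.Chars.strip (PySem.Chars.slice line (some 4) none))
  else (st.1, st.2.1, st.2.2 ++ ' ' :: line)

def parse_dual_script_py (script : String) : List (String × String) :=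
  let fin := (PySem.Chars.splitOn script.toList ['\n']).foldl pvStepA ([], [], [])
  (pvFlushA fin.1 fin.2.1 fin.2.2).map (fun p => (String.ofList p.1, String.ofList p.2))

-- ===== PORT B =====
-- `records[-1][1].append(line)` (no-op on an empty records list, as Python's `elif records:` guard)
def pvAppendLast : List (List Char × List (List Char)) → List Char →
    List (List Char × List (List Char))
  | [], _ => []
  | [r], l => [(r.1, r.2 ++ [l])]
  | r :: s :: rs, l => r :: pvAppendLast (s :: rs) l

-- one iteration of B's building loop over lines; state = records (speaker, fragment list)
def pvStepB (recs : List (List Char × List (List Char))) (raw : List Char) :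
    List (List Char × List (List Char)) :=
  let line := PySem.Chars.strip raw
  if line = [] then recs
  else if PySem.Chars.startswith (PySem.Chars.upper line) "ALEX:".toList then
    recs ++ [("alex".toList, [PySem.Chars.strip (PySem.Chars.slice line (some 5) none)])]
  else if PySem.Chars.startswith (PySem.Chars.upper line) "SAM:".toList then
    recs ++ [("sam".toList, [PySem.Chars.strip (PySem.Chars.slice line (some 4) none)])]
  else pvAppendLast recs line

-- one iteration of B's rendering loop: join fragments with ' ', strip, keep non-empty
def pvRenderStep (out : List (List Char × List Char)) (r : List Char × List (List Char)) :
    List (List Char × List Char) :=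
  if r.1 ≠ [] ∧ PySem.Chars.strip (PySem.Chars.join [' '] r.2) ≠ [] then
    out ++ [(r.1, PySem.Chars.strip (PySem.Chars.join [' '] r.2))]
  else out

def parse_dual_script_py_alt (script : String) : List (String × String) :=
  ((((PySem.Chars.splitOn script.toList ['\n']).foldl pvStepB []).foldl pvRenderStep []).map
    (fun p => (String.ofList p.1, String.ofList p.2)))

-- ===== PRECONDITION & SPEC =====
def Spec_parse_dual_script_py (script : String) (out : List (String × String)) : Prop := out = parse_dual_script_py_alt script
instance (script : String) (out : List (String × String)) : Decidable (Spec_parse_dual_script_py script out) := by unfold Spec_parse_dual_script_py; infer_instance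

-- ===== CLAIM (what is proved, stated in full; the proofs are below) =====
def Claim_equal_parse_dual_script_py : Prop := ∀ (script : String), Dom_parse_dual_script_py script → Spec_parse_dual_script_py script (parse_dual_script_py script)

-- ===== LEMMAS AND PROOFS =====
def pvRender (recs : List (List Char × List (List Char))) : List (List Char × List Char) :=
  recs.foldl pvRenderStep []

theorem pv_strip_eq_nil_iff (s : List Char) :
    PySem.Chars.strip s = [] ↔ ∀ c ∈ s, PySem.Chars.isspace c = true := by
  simp only [PySem.Chars.strip, PySem.Chars.rstrip, PySem.Chars.lstrip,
    List.reverse_eq_nil_iff, List.dropWhile_eq_nil_iff, List.mem_reverse]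
  constructor
  · intro h c hc
    have hc' : c ∈ s.takeWhile PySem.Chars.isspace ++ s.dropWhile PySem.Chars.isspace := by
      rw [List.takeWhile_append_dropWhile]; exact hc
    rcases List.mem_append.mp hc' with h1 | h2
    · exact List.mem_takeWhile_imp h1
    · exact h c h2
  · intro h c hc
    exact h c ((List.dropWhile_sublist _).subset hc)

theorem pv_strip_has_nonspace (s : List Char) (h : PySem.Chars.strip s ≠ []) :
    ∃ c ∈ PySem.Chars.strip s, PySem.Chars.isspace c = false := by
  simp only [PySem.Chars.strip, PySem.Chars.rstrip, PySem.Chars.lstrip] at h ⊢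
  set t := (s.dropWhile PySem.Chars.isspace).reverse.dropWhile PySem.Chars.isspace with ht
  have htne : t ≠ [] := by
    intro hnil; exact h (by rw [hnil]; rfl)
  refine ⟨t.head htne, List.mem_reverse.mpr (List.head_mem htne), ?_⟩
  have := List.head_dropWhile_not (p := PySem.Chars.isspace)
    (l := (s.dropWhile PySem.Chars.isspace).reverse) (by rw [← ht]; exact htne)
  simpa using this

theorem pv_mem_intersperse {f : List Char} (sep : List Char) :
    ∀ (parts : List (List Char)), f ∈ parts → f ∈ parts.intersperse sep
  | [p], h => by simpa using h
  | p :: q :: ps, h => by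
    rw [List.intersperse_cons₂]
    rcases List.mem_cons.mp h with h1 | h2
    · rw [h1]; exact List.mem_cons_self
    · exact List.mem_cons_of_mem _ (List.mem_cons_of_mem _
        (pv_mem_intersperse sep (q :: ps) h2))

theorem pv_mem_join {c : Char} {f : List Char} (sep : List Char)
    (parts : List (List Char)) (hf : f ∈ parts) (hc : c ∈ f) :
    c ∈ PySem.Chars.join sep parts := by
  simp only [PySem.Chars.join, List.intercalate, List.mem_flatten]
  exact ⟨f, pv_mem_intersperse sep parts hf, hc⟩

theorem pv_join_append_singleton (sep x : List Char) :
    ∀ (xs : List (List Char)), xs ≠ [] →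
      PySem.Chars.join sep (xs ++ [x]) = PySem.Chars.join sep xs ++ sep ++ x
  | [a], _ => by
    simp [PySem.Chars.join, List.intercalate, List.intersperse_cons₂]
  | a :: b :: t, _ => by
    have ih := pv_join_append_singleton sep x (b :: t) (by simp)
    simp only [PySem.Chars.join, List.intercalate] at ih ⊢
    simp only [List.cons_append] at ih
    simp only [List.cons_append, List.intersperse_cons₂, List.flatten_cons]
    rw [ih]
    simp [List.append_assoc]

theorem pv_appendLast_snoc (r : List Char × List (List Char)) (l : List Char) :
    ∀ (xs : List (List Char × List (List Char))),
      pvAppendLast (xs ++ [r]) l = xs ++ [(r.1, r.2 ++ [l])]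
  | [] => by simp [pvAppendLast]
  | a :: t => by
    have ih := pv_appendLast_snoc r l t
    cases t with
    | nil => simp [pvAppendLast]
    | cons b u => simpa [pvAppendLast] using ih

-- fragments invariant: first fragment is a stripped string; later ones are stripped and non-empty
def pvGood (f0 : List Char) (rest : List (List Char)) : Prop :=
  (∃ g, f0 = PySem.Chars.strip g) ∧ ∀ f ∈ rest, f ≠ [] ∧ ∃ g, f = PySem.Chars.strip g

theorem pv_join_strip_ne (f0 : List Char) (rest : List (List Char)) (hg : pvGood f0 rest)
    (hne : PySem.Chars.join [' '] (f0 :: rest) ≠ []) :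
    PySem.Chars.strip (PySem.Chars.join [' '] (f0 :: rest)) ≠ [] := by
  -- pick a non-empty fragment of the form `strip g`
  have hfrag : ∃ f ∈ f0 :: rest, f ≠ [] ∧ ∃ g, f = PySem.Chars.strip g := by
    cases rest with
    | nil =>
      refine ⟨f0, List.mem_cons_self, ?_, hg.1⟩
      intro h0; exact hne (by simp [PySem.Chars.join, List.intercalate, h0])
    | cons r rs =>
      exact ⟨r, List.mem_cons_of_mem _ List.mem_cons_self, hg.2 r List.mem_cons_self⟩
  obtain ⟨f, hfmem, hfne, g, hfg⟩ := hfrag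
  obtain ⟨c, hcf, hcs⟩ := pv_strip_has_nonspace g (by rw [← hfg]; exact hfne)
  rw [← hfg] at hcf
  have hcj : c ∈ PySem.Chars.join [' '] (f0 :: rest) := pv_mem_join _ _ hfmem hcf
  intro hstrip
  have := (pv_strip_eq_nil_iff _).mp hstrip c hcj
  rw [this] at hcs; cases hcs

-- the simulation invariant between A's state and B's records
def pvInv (st : List (List Char × List Char) × List Char × List Char)
    (recs : List (List Char × List (List Char))) : Prop :=
  (st.2.1 = [] ∧ st.1 = [] ∧ recs = [])
  ∨ (st.2.1 ≠ [] ∧ ∃ closed f0 rest,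
      recs = closed ++ [(st.2.1, f0 :: rest)] ∧
      pvRender closed = st.1 ∧
      st.2.2 = PySem.Chars.join [' '] (f0 :: rest) ∧
      pvGood f0 rest)

theorem pv_inv_render (st : List (List Char × List Char) × List Char × List Char)
    (recs : List (List Char × List (List Char))) (h : pvInv st recs) :
    pvRender recs = pvFlushA st.1 st.2.1 st.2.2 := by
  rcases h with ⟨hspk, hsegs, hrecs⟩ | ⟨hspk, closed, f0, rest, hrecs, hrender, htxt, hgood⟩
  · subst hrecs; simp [pvRender, pvFlushA, hspk, hsegs]
  · subst hrecs
    show List.foldl pvRenderStep [] (closed ++ [(st.2.1, f0 :: rest)]) = _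
    rw [List.foldl_append, List.foldl_cons, List.foldl_nil]
    show pvRenderStep (pvRender closed) (st.2.1, f0 :: rest) = _
    rw [hrender]
    unfold pvRenderStep pvFlushA
    by_cases hj : PySem.Chars.join [' '] (f0 :: rest) = []
    · rw [htxt]
      simp [hj, PySem.Chars.strip, PySem.Chars.lstrip, PySem.Chars.rstrip]
    · have hs := pv_join_strip_ne f0 rest hgood hj
      rw [htxt]
      simp [hj, hs, hspk]

theorem pv_inv_step (st : List (List Char × List Char) × List Char × List Char)
    (recs : List (List Char × List (List Char))) (raw : List Char) (h : pvInv st recs) :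
    pvInv (pvStepA st raw) (pvStepB recs raw) := by
  by_cases hline : PySem.Chars.strip raw = []
  · simpa [pvStepA, pvStepB, hline] using h
  by_cases halex : PySem.Chars.startswith (PySem.Chars.upper (PySem.Chars.strip raw))
      "ALEX:".toList = true
  · simp only [pvStepA, pvStepB, hline, halex, if_true, ite_false]
    refine Or.inr ⟨by simp, recs, _, [], rfl, pv_inv_render st recs h, ?_, ⟨_, rfl⟩, by simp⟩
    simp [PySem.Chars.join, List.intercalate]
  by_cases hsam : PySem.Chars.startswith (PySem.Chars.upper (PySem.Chars.strip raw))
      "SAM:".toList = true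
  · simp only [pvStepA, pvStepB, hline, halex, hsam, if_true, ite_false]
    refine Or.inr ⟨by simp, recs, _, [], rfl, pv_inv_render st recs h, ?_, ⟨_, rfl⟩, by simp⟩
    simp [PySem.Chars.join, List.intercalate]
  · simp only [pvStepA, pvStepB, hline, halex, hsam, ite_false]
    rcases h with ⟨hspk, hsegs, hrecs⟩ | ⟨hspk, closed, f0, rest, hrecs, hrender, htxt, hgood⟩
    · subst hrecs
      exact Or.inl ⟨hspk, hsegs, by simp [pvAppendLast]⟩
    · subst hrecs
      refine Or.inr ⟨hspk, closed, f0, rest ++ [PySem.Chars.strip raw], ?_, hrender, ?_, ?_, ?_⟩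
      · rw [pv_appendLast_snoc]; simp
      · show st.2.2 ++ ' ' :: PySem.Chars.strip raw = _
        rw [htxt, show f0 :: (rest ++ [PySem.Chars.strip raw]) =
          (f0 :: rest) ++ [PySem.Chars.strip raw] by simp,
          pv_join_append_singleton _ _ _ (List.cons_ne_nil _ _)]
        simp
      · exact hgood.1
      · intro f hf
        rcases List.mem_append.mp hf with h1 | h2
        · exact hgood.2 f h1
        · have : f = PySem.Chars.strip raw := by simpa using h2
          exact ⟨this ▸ hline, raw, this⟩

theorem pv_inv_foldl (lines : List (List Char))
    (st : List (List Char × List Char) × List Char × List Char)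
    (recs : List (List Char × List (List Char))) (h : pvInv st recs) :
    pvInv (lines.foldl pvStepA st) (lines.foldl pvStepB recs) := by
  induction lines generalizing st recs with
  | nil => exact h
  | cons l ls ih => exact ih _ _ (pv_inv_step st recs l h)

-- ===== VERDICT (by name: the statement is the Claim_ definition above) =====
theorem parse_dual_script_py_spec : Claim_equal_parse_dual_script_py := by
  intro script _
  unfold Spec_parse_dual_script_py parse_dual_script_py parse_dual_script_py_alt
  have h := pv_inv_foldl (PySem.Chars.splitOn script.toList ['\n']) ([], [], []) []
    (Or.inl ⟨rfl, rfl, rfl⟩)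
  have := pv_inv_render _ _ h
  rw [← pvRender, this]
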